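-- pv_equiv track=rewrite | github.com/ayakongaa/AaDS-HW03 | 04twoStrings.py | extraLetter
-- ===== SOURCE A (Python) =====
-- def extraLetter(a: str, b: str) -> str:
--     hashMapB = {}
--
--     for char in b:
--         hashMapB[char] = hashMapB.get(char, 0) + 1
--
--     for char in a:
--         if char in hashMapB:
--             hashMapB[char] -= 1
--
--     for letter, count in hashMapB.items():
--         if count > 0:
--             return letter
--
--     return ""
-- ===== SOURCE B (Python) =====
-- def extraLetter(a: str, b: str) -> str:
--     # Scan b in order; the first char whose multiplicity in b exceeds its
--     # multiplicity in a is exactly the first positive-leftover key of A's counter.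
--     for c in b:
--         if b.count(c) > a.count(c):
--             return c
--     return ""
-- ===== Notes on version B (the rewrite author's own statement) =====
-- stated objective: simpler
-- what changed: Replaces A's three passes over a mutable count dictionary (build counter of b, decrement for chars of a, scan items for a positive count) with a single direct scan of b that recounts occurrences on demand via str.count, returning the first char with b.count(c) > a.count(c).
import Mathlib
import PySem

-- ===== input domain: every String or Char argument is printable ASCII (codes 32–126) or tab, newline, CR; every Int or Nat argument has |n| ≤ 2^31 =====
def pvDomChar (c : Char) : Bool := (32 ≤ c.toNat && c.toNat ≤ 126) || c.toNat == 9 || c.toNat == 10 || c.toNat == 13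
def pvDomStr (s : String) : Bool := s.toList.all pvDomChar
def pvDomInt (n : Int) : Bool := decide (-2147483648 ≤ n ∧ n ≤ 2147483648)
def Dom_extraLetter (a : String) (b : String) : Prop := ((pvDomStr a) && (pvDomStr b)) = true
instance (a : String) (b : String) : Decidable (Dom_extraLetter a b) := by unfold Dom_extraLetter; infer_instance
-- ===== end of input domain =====

-- B replaces A's build-a-counter-then-three-passes with a single direct scan of b
-- that counts occurrences on demand (objective: simpler; same return value everywhere).

-- ===== PORT A =====
def extraLetter (a : String) (b : String) : String :=
  -- hashMapB = {}; for char in b: hashMapB[char] = hashMapB.get(char, 0) + 1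
  let d1 : PySem.Dict Char Int :=
    b.toList.foldl (fun d c => d.insert c (d.getD c 0 + 1)) PySem.Dict.empty
  -- for char in a: if char in hashMapB: hashMapB[char] -= 1
  let d2 : PySem.Dict Char Int :=
    a.toList.foldl (fun d c => if d.contains c then d.insert c (d.getD c 0 - 1) else d) d1
  -- for letter, count in hashMapB.items(): if count > 0: return letter
  match d2.items.find? (fun p => decide (0 < p.2)) with
  | some p => String.ofList [p.1]
  | none => ""

-- ===== PORT B =====
def extraLetter_alt (a : String) (b : String) : String :=
  -- for c in b: if b.count(c) > a.count(c): return c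
  match b.toList.find? (fun c =>
      decide (PySem.Str.count a (String.ofList [c]) < PySem.Str.count b (String.ofList [c]))) with
  | some c => String.ofList [c]
  | none => ""

-- ===== PRECONDITION & SPEC =====
def Spec_extraLetter (a : String) (b : String) (out : String) : Prop := out = extraLetter_alt a b
instance (a : String) (b : String) (out : String) : Decidable (Spec_extraLetter a b out) := by unfold Spec_extraLetter; infer_instance

-- ===== CLAIM (what is proved, stated in full; the proofs are below) =====
def Claim_equal_extraLetter : Prop := ∀ (a : String) (b : String), Dom_extraLetter a b → Spec_extraLetter a b (extraLetter a b)

-- ===== LEMMAS AND PROOFS =====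

-- str.count with a single-character needle is list count: first the fuelled worker …
lemma count_go_single (c : Char) (s : List Char) (acc : Nat) :
    PySem.Chars.count.go [c] s.length s acc = acc + s.count c := by
  induction s generalizing acc with
  | nil => simp [PySem.Chars.count.go]
  | cons h t ih =>
      by_cases hc : c = h
      · subst hc
        have := ih (acc + 1)
        simp only [PySem.Chars.count.go, List.isPrefixOf, BEq.rfl,
          Bool.and_self, if_true, List.length_cons, List.count_cons,
          List.length_nil, List.drop_succ_cons, List.drop_zero] at *
        omega
      · simp [PySem.Chars.count.go, List.isPrefixOf, hc, Ne.symm hc, ih acc]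

-- … then the wrapper.
lemma count_single (s : List Char) (c : Char) :
    PySem.Chars.count s [c] = s.count c := by
  simpa [PySem.Chars.count] using count_go_single c s 0

-- find? ignores a predicate's value off the list, so congruence on members suffices.
lemma find?_congr_mem {α : Type} (l : List α) (p q : α → Bool)
    (h : ∀ x ∈ l, p x = q x) : l.find? p = l.find? q := by
  induction l with
  | nil => rfl
  | cons x t ih =>
      have hx := h x (by simp)
      by_cases hp : p x = true
      · simp [List.find?, hp, hx ▸ hp]
      · have hp' : p x = false := by simpa using hp
        simp [List.find?, hp', hx ▸ hp',
          ih (fun y hy => h y (by simp [hy]))]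

-- filtering out elements the predicate rejects does not change find?.
lemma find?_filter_ne {α : Type} [BEq α] [LawfulBEq α] (l : List α) (p : α → Bool) (x : α)
    (hx : p x = false) : (l.filter (fun y => !(y == x))).find? p = l.find? p := by
  induction l with
  | nil => rfl
  | cons h t ih =>
      by_cases he : h = x
      · subst he; simp [List.find?, hx, ih]
      · have hbe : (h == x) = false := by simp [he]
        by_cases hp : p h = true
        · simp [hbe, List.find?, hp]
        · have hp' : p h = false := by simpa using hp
          simp [hbe, List.find?, hp', ih]

-- the first match among the distinct elements (first-appearance order) is the first match in the list.
lemma find?_ofList {α : Type} [BEq α] [LawfulBEq α] (l : List α) (p : α → Bool) :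
    (PySem.Set.ofList l).find? p = l.find? p := by
  induction l with
  | nil => rfl
  | cons x t ih =>
      rw [PySem.Set.ofList_cons]
      by_cases hp : p x = true
      · simp [List.find?, hp]
      · have hp' : p x = false := by simpa using hp
        simp only [List.find?, hp', PySem.Set.discard]
        rw [find?_filter_ne _ _ _ hp', ih]

-- A's second loop: keys are unchanged …
lemma decLoop_keys (l : List Char) (d : PySem.Dict Char Int) :
    (l.foldl (fun d c => if d.contains c then d.insert c (d.getD c 0 - 1) else d) d).keys
      = d.keys := by
  induction l generalizing d with
  | nil => rfl
  | cons c t ih =>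
      by_cases hc : d.contains c = true
      · simp only [List.foldl, hc, if_true]
        rw [ih, PySem.Dict.keys_insert_of_contains d _ hc]
      · have hc' : d.contains c = false := by simpa using hc
        simp [List.foldl, hc', ih]

-- … and each present key's value drops by that key's count in l.
lemma decLoop_getD (l : List Char) (d : PySem.Dict Char Int) (v : Char) :
    (l.foldl (fun d c => if d.contains c then d.insert c (d.getD c 0 - 1) else d) d).getD v 0
      = d.getD v 0 - (if d.contains v then (l.count v : Int) else 0) := by
  induction l generalizing d with
  | nil => simp
  | cons c t ih =>
      by_cases hc : d.contains c = true
      · have hkeys := PySem.Dict.keys_insert_of_contains d (d.getD c 0 - 1) hc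
        have hcont : ∀ w, (d.insert c (d.getD c 0 - 1)).contains w = d.contains w := by
          intro w
          rw [PySem.Dict.contains_eq_decide_mem_keys, PySem.Dict.contains_eq_decide_mem_keys,
            hkeys]
        simp only [List.foldl, hc, if_true, ih, hcont, PySem.Dict.getD_insert]
        by_cases hvc : v = c
        · subst hvc; simp [hc]; ring
        · simp [hvc, Ne.symm hvc]
      · have hc' : d.contains c = false := by simpa using hc
        simp only [List.foldl, hc, ih]
        by_cases hvc : v = c
        · subst hvc; simp [hc']
        · by_cases hv : d.contains v = true
          · simp [hv, Ne.symm hvc]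
          · simp [hv]

-- ===== VERDICT (by name: the statement is the Claim_ definition above) =====
theorem extraLetter_spec : Claim_equal_extraLetter := by
  intro a b _
  unfold Spec_extraLetter
  simp only [extraLetter, extraLetter_alt, PySem.Dict.foldl_insert_getD_add_one_eq_counter]
  have hkeys : (a.toList.foldl
      (fun d c => if d.contains c then d.insert c (d.getD c 0 - 1) else d)
      (PySem.Dict.counter b.toList)).keys = PySem.Set.ofList b.toList := by
    rw [decLoop_keys, PySem.Dict.keys_counter]
  have hnd : (a.toList.foldl
      (fun d c => if d.contains c then d.insert c (d.getD c 0 - 1) else d)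
      (PySem.Dict.counter b.toList)).keys.Nodup := by
    rw [hkeys]; exact PySem.Set.nodup_ofList _
  rw [PySem.Dict.items_eq_map_keys _ hnd 0, hkeys, List.find?_map]
  have hpt : ∀ c ∈ PySem.Set.ofList b.toList,
      ((fun p : Char × Int => decide (0 < p.2)) ∘
        (fun k => (k, (a.toList.foldl
          (fun d c => if d.contains c then d.insert c (d.getD c 0 - 1) else d)
          (PySem.Dict.counter b.toList)).getD k 0))) c
      = decide (PySem.Str.count a (String.ofList [c]) < PySem.Str.count b (String.ofList [c])) := by
    intro c hc
    have hmem : c ∈ b.toList := (PySem.Set.mem_ofList _ _).mp hc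
    have hcont : (PySem.Dict.counter b.toList).contains c = true := by
      rw [PySem.Dict.contains_eq_decide_mem_keys, PySem.Dict.keys_counter]
      simpa [PySem.Set.mem_ofList]
    simp only [Function.comp, decLoop_getD, hcont, if_true, PySem.Dict.getD_counter,
      PySem.Str.count_eq]
    simp only [String.toList_ofList, count_single]
    simp only [decide_eq_decide]
    omega
  rw [find?_congr_mem _ _ _ hpt, find?_ofList]
  cases hf : b.toList.find?
      (fun c => decide (PySem.Str.count a (String.ofList [c]) < PySem.Str.count b (String.ofList [c]))) with
  | none => simp
  | some c => simp
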